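-- pv_equiv track=rewrite | github.com/guillemmr/advent_of_code_2020 | dev/Day12/day12.py | do_move_ship
-- ===== SOURCE A (Python) =====
-- def turn_ship_clockwise(actual_dir, degrees) -> str:
--     if degrees == 90 or degrees == -270:
--         if actual_dir == "E": return "S"
--         if actual_dir == "S": return "W"
--         if actual_dir == "W": return "N"
--         if actual_dir == "N": return "E"
--     if degrees == 180 or degrees == -180:
--         if actual_dir == "E": return "W"
--         if actual_dir == "S": return "N"
--         if actual_dir == "W": return "E"
--         if actual_dir == "N": return "S"
--     if degrees == 270 or degrees == -90:
--         if actual_dir == "E": return "N"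
--         if actual_dir == "S": return "E"
--         if actual_dir == "W": return "S"
--         if actual_dir == "N": return "W"
--     raise Exception("ups")
--
-- def do_move_ship(ship, actual_dir, type_mov: str, units_mov: int) -> set:
--     if type_mov == "N":
--         ship["y"] += units_mov
--     if type_mov == "S":
--         ship["y"] -= units_mov
--     if type_mov == "E":
--         ship["x"] += units_mov
--     if type_mov == "W":
--         ship["x"] -= units_mov
--     if type_mov == "L":
--         actual_dir = turn_ship_clockwise(actual_dir, -units_mov)
--     if type_mov == "R":
--         actual_dir = turn_ship_clockwise(actual_dir, units_mov)
--     if type_mov == "F":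
--         ship, actual_dir = do_move_ship(ship, actual_dir, actual_dir, units_mov)
--
--     return (ship, actual_dir)
-- ===== SOURCE B (Python) =====
-- # Alternative: directions are unit VECTORS; a turn is repeated 90-degree clockwise
-- # vector rotation (x,y)->(y,-x), movement is vector scaling added per nonzero axis;
-- # ship is still mutated in place and (ship, actual_dir) returned like the original.
--
-- _VEC = {"N": (0, 1), "E": (1, 0), "S": (0, -1), "W": (-1, 0)}
-- _DIR = {v: k for k, v in _VEC.items()}
--
--
-- def turn_ship_clockwise(actual_dir, degrees) -> str:
--     if degrees not in (90, 180, 270, -90, -180, -270):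
--         raise Exception("ups")
--     x, y = _VEC[actual_dir]
--     for _ in range((degrees // 90) % 4):
--         x, y = y, -x
--     return _DIR[(x, y)]
--
--
-- def do_move_ship(ship, actual_dir, type_mov: str, units_mov: int):
--     if type_mov in ("L", "R"):
--         actual_dir = turn_ship_clockwise(
--             actual_dir, units_mov if type_mov == "R" else -units_mov)
--     else:
--         eff = actual_dir if type_mov == "F" else type_mov
--         v = _VEC.get(eff)
--         if v is not None:
--             if v[0]:
--                 ship["x"] += v[0] * units_mov
--             if v[1]:
--                 ship["y"] += v[1] * units_mov
--     return (ship, actual_dir)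
-- ===== Notes on version B (the rewrite author's own statement) =====
-- stated objective: alternative
-- what changed: Directions become unit vectors: turn_ship_clockwise validates degrees and then rotates the vector by (x,y)->(y,-x) in a loop of (degrees//90)%4 steps and decodes it back, instead of A's 12-branch if ladder; do_move_ship replaces the four per-direction branches plus the F self-recursion by scaling the effective direction's vector and adding each nonzero component to its axis.
import Mathlib
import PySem

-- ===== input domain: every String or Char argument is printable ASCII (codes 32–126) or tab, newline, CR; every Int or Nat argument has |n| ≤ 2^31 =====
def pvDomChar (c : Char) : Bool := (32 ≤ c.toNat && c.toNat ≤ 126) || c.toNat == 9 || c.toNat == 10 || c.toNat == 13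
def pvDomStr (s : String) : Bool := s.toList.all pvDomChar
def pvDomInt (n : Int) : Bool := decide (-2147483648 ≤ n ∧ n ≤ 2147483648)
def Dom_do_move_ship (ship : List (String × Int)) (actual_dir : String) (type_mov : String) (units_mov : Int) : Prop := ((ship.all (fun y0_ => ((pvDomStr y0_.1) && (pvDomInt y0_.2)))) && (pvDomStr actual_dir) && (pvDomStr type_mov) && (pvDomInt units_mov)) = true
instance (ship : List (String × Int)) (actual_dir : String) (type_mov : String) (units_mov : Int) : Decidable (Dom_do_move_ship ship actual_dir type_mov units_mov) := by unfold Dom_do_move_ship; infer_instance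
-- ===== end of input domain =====

-- B recasts directions as unit vectors (turn = iterated 90° vector rotation, move =
-- vector scaling per axis) instead of A's if-ladders; the equivalence proved is about
-- the RETURN value (both Pythons also mutate ship in place identically).

-- ===== PORT A =====
-- A's turn_ship_clockwise; none = the final `raise Exception("ups")`
def turn_ship_clockwise (actual_dir : String) (degrees : Int) : Option String :=
  if (degrees = 90 ∨ degrees = -270) ∧ actual_dir = "E" then some "S" else
  if (degrees = 90 ∨ degrees = -270) ∧ actual_dir = "S" then some "W" else
  if (degrees = 90 ∨ degrees = -270) ∧ actual_dir = "W" then some "N" else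
  if (degrees = 90 ∨ degrees = -270) ∧ actual_dir = "N" then some "E" else
  if (degrees = 180 ∨ degrees = -180) ∧ actual_dir = "E" then some "W" else
  if (degrees = 180 ∨ degrees = -180) ∧ actual_dir = "S" then some "N" else
  if (degrees = 180 ∨ degrees = -180) ∧ actual_dir = "W" then some "E" else
  if (degrees = 180 ∨ degrees = -180) ∧ actual_dir = "N" then some "S" else
  if (degrees = 270 ∨ degrees = -90) ∧ actual_dir = "E" then some "N" else
  if (degrees = 270 ∨ degrees = -90) ∧ actual_dir = "S" then some "E" else
  if (degrees = 270 ∨ degrees = -90) ∧ actual_dir = "W" then some "S" else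
  if (degrees = 270 ∨ degrees = -90) ∧ actual_dir = "N" then some "W" else
  none

-- A's do_move_ship body; fuel bounds the `F` self-recursion, which in Python is one
-- level deep except for actual_dir = "F" (RecursionError, excluded by Pre_), where
-- fuel 0 is reached.  `.getD dir` on the turn result covers only the raise path
-- (none), also excluded by Pre_.  ship["k"] += v is Dict.modify (KeyError — key
-- absent — is excluded by Pre_).
def do_move_ship_go : Nat → PySem.Dict String Int → String → String → Int → (PySem.Dict String Int) × String
  | 0, ship, actual_dir, _, _ => (ship, actual_dir)
  | Nat.succ fuel, ship, actual_dir, type_mov, units_mov =>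
    let ship := if type_mov = "N" then ship.modify "y" 0 (· + units_mov) else ship
    let ship := if type_mov = "S" then ship.modify "y" 0 (· - units_mov) else ship
    let ship := if type_mov = "E" then ship.modify "x" 0 (· + units_mov) else ship
    let ship := if type_mov = "W" then ship.modify "x" 0 (· - units_mov) else ship
    let actual_dir := if type_mov = "L" then (turn_ship_clockwise actual_dir (-units_mov)).getD actual_dir else actual_dir
    let actual_dir := if type_mov = "R" then (turn_ship_clockwise actual_dir units_mov).getD actual_dir else actual_dir
    if type_mov = "F" then do_move_ship_go fuel ship actual_dir actual_dir units_mov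
    else (ship, actual_dir)

def do_move_ship (ship : List (String × Int)) (actual_dir : String) (type_mov : String) (units_mov : Int) : (List (String × Int)) × String :=
  let r := do_move_ship_go 2 (PySem.Dict.mk ship) actual_dir type_mov units_mov
  (r.1.items, r.2)

-- ===== PORT B =====
def pvVec : PySem.Dict String (Int × Int) :=
  PySem.Dict.mk [("N", (0, 1)), ("E", (1, 0)), ("S", (0, -1)), ("W", (-1, 0))]
def pvDir : PySem.Dict (Int × Int) String :=
  PySem.Dict.mk [((0, 1), "N"), ((1, 0), "E"), ((0, -1), "S"), ((-1, 0), "W")]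

-- B's turn: validate degrees, decode to a unit vector, rotate it clockwise
-- (x,y)->(y,-x) (degrees//90)%4 times, decode back.
-- none = B's raise (invalid degrees) or the _VEC/_DIR KeyError; all excluded by Pre_.
def turn_ship_clockwise_alt (actual_dir : String) (degrees : Int) : Option String :=
  if ¬ (degrees ∈ ([90, 180, 270, -90, -180, -270] : List Int)) then none
  else match pvVec.get? actual_dir with
    | none => none
    | some v =>
      let p := (PySem.List.pyRange 0 (PySem.Int.mod (PySem.Int.floordiv degrees 90) 4) 1).foldl
                 (fun (p : Int × Int) _ => (p.2, -p.1)) v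
      pvDir.get? p

def do_move_ship_alt (ship : List (String × Int)) (actual_dir : String) (type_mov : String) (units_mov : Int) : (List (String × Int)) × String :=
  if type_mov = "L" ∨ type_mov = "R" then
    (ship, (turn_ship_clockwise_alt actual_dir (if type_mov = "R" then units_mov else -units_mov)).getD actual_dir)
  else
    let eff := if type_mov = "F" then actual_dir else type_mov
    match pvVec.get? eff with
    | none => (ship, actual_dir)
    | some v =>
      let d := PySem.Dict.mk ship
      let d := if v.1 ≠ 0 then d.modify "x" 0 (· + v.1 * units_mov) else d
      let d := if v.2 ≠ 0 then d.modify "y" 0 (· + v.2 * units_mov) else d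
      (d.items, actual_dir)

-- ===== PRECONDITION & SPEC =====
-- Pre_ holds exactly where Python A returns normally; it excludes only inputs where A
-- raises: KeyError when the needed axis key is absent, Exception("ups") for an invalid
-- turn (degrees not in ±{90,180,270} or a non-cardinal direction), and type_mov = "F"
-- with actual_dir in {"L","R","F"} (Exception("ups") or RecursionError).
def Pre_do_move_ship (ship : List (String × Int)) (actual_dir : String) (type_mov : String) (units_mov : Int) : Prop :=
  ((type_mov = "N" ∨ type_mov = "S" ∨ (type_mov = "F" ∧ (actual_dir = "N" ∨ actual_dir = "S"))) → "y" ∈ ship.map Prod.fst) ∧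
  ((type_mov = "E" ∨ type_mov = "W" ∨ (type_mov = "F" ∧ (actual_dir = "E" ∨ actual_dir = "W"))) → "x" ∈ ship.map Prod.fst) ∧
  ((type_mov = "L" ∨ type_mov = "R") →
      (actual_dir = "N" ∨ actual_dir = "E" ∨ actual_dir = "S" ∨ actual_dir = "W") ∧
      (units_mov = 90 ∨ units_mov = 180 ∨ units_mov = 270 ∨ units_mov = -90 ∨ units_mov = -180 ∨ units_mov = -270)) ∧
  (type_mov = "F" → actual_dir ≠ "F" ∧ actual_dir ≠ "L" ∧ actual_dir ≠ "R")
instance (ship : List (String × Int)) (actual_dir : String) (type_mov : String) (units_mov : Int) : Decidable (Pre_do_move_ship ship actual_dir type_mov units_mov) := by unfold Pre_do_move_ship; infer_instance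

def pvWitness_do_move_ship : (List (String × Int)) × String × String × Int := ([("x", 3), ("y", -1)], "E", "F", 7)

def Spec_do_move_ship (ship : List (String × Int)) (actual_dir : String) (type_mov : String) (units_mov : Int) (out : (List (String × Int)) × String) : Prop := out = do_move_ship_alt ship actual_dir type_mov units_mov
instance (ship : List (String × Int)) (actual_dir : String) (type_mov : String) (units_mov : Int) (out : (List (String × Int)) × String) : Decidable (Spec_do_move_ship ship actual_dir type_mov units_mov out) := by unfold Spec_do_move_ship; infer_instance

-- ===== CLAIM =====
def Claim_equal_do_move_ship : Prop := ∀ (ship : List (String × Int)) (actual_dir : String) (type_mov : String) (units_mov : Int), Dom_do_move_ship ship actual_dir type_mov units_mov → Pre_do_move_ship ship actual_dir type_mov units_mov → Spec_do_move_ship ship actual_dir type_mov units_mov (do_move_ship ship actual_dir type_mov units_mov)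

-- ===== LEMMAS AND PROOFS =====

-- ===== VERDICT =====
theorem do_move_ship_spec : Claim_equal_do_move_ship := by
  intro ship dir t u _ hpre
  obtain ⟨-, -, hLR, hF⟩ := hpre
  unfold Spec_do_move_ship
  by_cases hL : t = "L" ∨ t = "R"
  · obtain ⟨hd, hu⟩ := hLR hL
    rcases hL with h | h <;> subst h <;>
      rcases hd with h | h | h | h <;> subst h <;>
      rcases hu with h | h | h | h | h | h <;> subst h <;> rfl
  · rw [not_or] at hL
    obtain ⟨htL, htR⟩ := hL
    by_cases hN : t = "N"
    · subst hN
      simp [do_move_ship, do_move_ship_go, do_move_ship_alt, pvVec, PySem.Dict.get?]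
    · by_cases hS : t = "S"
      · subst hS
        simp [do_move_ship, do_move_ship_go, do_move_ship_alt, pvVec, PySem.Dict.get?, sub_eq_add_neg, neg_mul, one_mul]
      · by_cases hE : t = "E"
        · subst hE
          simp [do_move_ship, do_move_ship_go, do_move_ship_alt, pvVec, PySem.Dict.get?, one_mul]
        · by_cases hW : t = "W"
          · subst hW
            simp [do_move_ship, do_move_ship_go, do_move_ship_alt, pvVec, PySem.Dict.get?, sub_eq_add_neg, neg_mul, one_mul]
          · by_cases hFt : t = "F"
            · subst hFt
              obtain ⟨hdF, hdL, hdR⟩ := hF rfl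
              by_cases hdN : dir = "N"
              · subst hdN
                simp [do_move_ship, do_move_ship_go, do_move_ship_alt, pvVec, PySem.Dict.get?, one_mul]
              · by_cases hdS : dir = "S"
                · subst hdS
                  simp [do_move_ship, do_move_ship_go, do_move_ship_alt, pvVec, PySem.Dict.get?, sub_eq_add_neg, neg_mul, one_mul]
                · by_cases hdE : dir = "E"
                  · subst hdE
                    simp [do_move_ship, do_move_ship_go, do_move_ship_alt, pvVec, PySem.Dict.get?, one_mul]
                  · by_cases hdW : dir = "W"
                    · subst hdW
                      simp [do_move_ship, do_move_ship_go, do_move_ship_alt, pvVec, PySem.Dict.get?, sub_eq_add_neg, neg_mul, one_mul]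
                    · simp [do_move_ship, do_move_ship_go, do_move_ship_alt, pvVec, PySem.Dict.get?,
                            List.find?, hdF, hdL, hdR, hdN, hdS, hdE, hdW,
                            beq_eq_false_iff_ne.mpr (Ne.symm hdN), beq_eq_false_iff_ne.mpr (Ne.symm hdS),
                            beq_eq_false_iff_ne.mpr (Ne.symm hdE), beq_eq_false_iff_ne.mpr (Ne.symm hdW)]
            · simp [do_move_ship, do_move_ship_go, do_move_ship_alt, pvVec, PySem.Dict.get?,
                    List.find?, hN, hS, hE, hW, htL, htR, hFt,
                    beq_eq_false_iff_ne.mpr (Ne.symm hN), beq_eq_false_iff_ne.mpr (Ne.symm hS),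
                    beq_eq_false_iff_ne.mpr (Ne.symm hE), beq_eq_false_iff_ne.mpr (Ne.symm hW)]
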